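-- pv_equiv track=rewrite | github.com/rishitoshsingh/magnet-tau | data_extender/extend_telecom.py | _device_names_by_category
-- ===== SOURCE A (Python) =====
-- from typing import Any, Dict, Iterable, List, Mapping, MutableMapping, Optional, Sequence, Tuple, Union
--
-- def _device_names_by_category(devices_json: Mapping[str, Any]) -> Dict[str, List[str]]:
--     out: Dict[str, List[str]] = {}
--     for device_name, rec in devices_json.items():
--         cat = rec.get("category", "unknown")
--         out.setdefault(cat, []).append(device_name)
--     for cat in out:
--         out[cat].sort()
--     return out
-- ===== SOURCE B (Python) =====
-- from typing import Any, Dict, List, Mapping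
--
--
-- def _device_names_by_category(devices_json: Mapping[str, Any]) -> Dict[str, List[str]]:
--     # Pass 1: register each category once, in order of first occurrence (fixes key order).
--     out: Dict[str, List[str]] = {}
--     for rec in devices_json.values():
--         out.setdefault(rec.get("category", "unknown"), [])
--     # Pass 2: one global sort of the names; appending in sorted order leaves every
--     # per-category list already sorted, so no per-category sorting phase is needed.
--     for name, rec in sorted(devices_json.items(), key=lambda kv: kv[0]):
--         out[rec.get("category", "unknown")].append(name)
--     return out
-- ===== Notes on version B (the rewrite author's own statement) =====
-- stated objective: alternative
-- what changed: Instead of grouping names in input order and then sorting each category's list, B registers the categories in one pass (fixing key order) and then makes a single pass over the items sorted once globally by name, appending into its category, so every per-category list is already sorted and the per-category sorting phase disappears.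
import Mathlib
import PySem

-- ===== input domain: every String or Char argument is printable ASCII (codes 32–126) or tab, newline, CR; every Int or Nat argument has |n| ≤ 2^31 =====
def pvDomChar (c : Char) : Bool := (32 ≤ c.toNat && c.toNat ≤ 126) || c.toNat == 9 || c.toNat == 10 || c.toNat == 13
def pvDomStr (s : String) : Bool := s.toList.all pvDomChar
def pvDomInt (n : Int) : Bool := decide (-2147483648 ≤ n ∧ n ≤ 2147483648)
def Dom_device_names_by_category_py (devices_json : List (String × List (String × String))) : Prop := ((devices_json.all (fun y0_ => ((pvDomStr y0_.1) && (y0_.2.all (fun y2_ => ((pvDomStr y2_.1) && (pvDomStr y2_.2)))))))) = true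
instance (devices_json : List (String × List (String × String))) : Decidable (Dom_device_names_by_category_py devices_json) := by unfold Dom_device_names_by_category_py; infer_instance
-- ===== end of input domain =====

-- B replaces A's per-category sorting phase by one global sort of the items by name before
-- grouping (key order is fixed by a first registration pass); same return value, no speed claim.

-- ===== PORT A =====
-- rec.get("category", "unknown")  (appears verbatim in both Pythons)
def pvCat (rec : List (String × String)) : String :=
  (PySem.Dict.mk rec).getD "category" "unknown"

def device_names_by_category_py (devices_json : List (String × List (String × String))) : List (String × List String) :=
  -- for device_name, rec in devices_json.items(): out.setdefault(cat, []).append(device_name)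
  let out := devices_json.foldl
    (fun d p => d.modify (pvCat p.2) [] (fun x => x ++ [p.1])) PySem.Dict.empty
  -- for cat in out: out[cat].sort()   (cat is always a key of out, so out[cat] never raises)
  let out2 := out.keys.foldl
    (fun d c => d.modify c [] (fun l => PySem.List.sorted l (fun x => x) false)) out
  out2.items

-- ===== PORT B =====
def device_names_by_category_py_alt (devices_json : List (String × List (String × String))) : List (String × List String) :=
  -- for rec in devices_json.values(): out.setdefault(rec.get("category","unknown"), [])
  let out := devices_json.foldl
    (fun d p => d.setdefault (pvCat p.2) []) PySem.Dict.empty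
  -- for name, rec in sorted(devices_json.items(), key=lambda kv: kv[0]): out[cat].append(name)
  -- (cat is always a key of out after the first pass, so out[cat] never raises)
  let out2 := (PySem.List.sorted devices_json (fun p => p.1) false).foldl
    (fun d p => d.modify (pvCat p.2) [] (fun x => x ++ [p.1])) out
  out2.items

-- ===== PRECONDITION & SPEC =====
def Spec_device_names_by_category_py (devices_json : List (String × List (String × String))) (out : List (String × List String)) : Prop := out = device_names_by_category_py_alt devices_json
instance (devices_json : List (String × List (String × String))) (out : List (String × List String)) : Decidable (Spec_device_names_by_category_py devices_json out) := by unfold Spec_device_names_by_category_py; infer_instance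

-- ===== CLAIM (what is proved, stated in full; the proofs are below) =====
def Claim_equal_device_names_by_category_py : Prop := ∀ (devices_json : List (String × List (String × String))), Dom_device_names_by_category_py devices_json → Spec_device_names_by_category_py devices_json (device_names_by_category_py devices_json)

-- ===== LEMMAS AND PROOFS =====

-- updating a set with elements it already has is a no-op
theorem pv_update_subset_eq {α : Type} [BEq α] [LawfulBEq α]
    (s : PySem.Set α) (xs : List α) (h : ∀ x ∈ xs, x ∈ s) :
    PySem.Set.update s xs = s := by
  induction xs generalizing s with
  | nil => rfl
  | cons x xs ih =>
    show PySem.Set.update (PySem.Set.add s x) xs = s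
    rw [show PySem.Set.add s x = s by
      simp [PySem.Set.add]
      exact h x List.mem_cons_self]
    exact ih s (fun y hy => h y (List.mem_cons_of_mem x hy))

-- the grouping fold of both ports: value at c collects the names whose category is c
theorem pv_getD_modify_fold (l : List (String × List (String × String)))
    (d : PySem.Dict String (List String)) (c : String) :
    (l.foldl (fun d p => d.modify (pvCat p.2) [] (fun x => x ++ [p.1])) d).getD c []
      = d.getD c [] ++ ((l.map (fun p => (pvCat p.2, p.1))).filter (fun q => q.1 == c)).map (fun q => q.2) := by
  have h := PySem.Dict.getD_foldl_modify_append (List.map (fun p => (pvCat p.2, p.1)) l) d c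
  rw [List.foldl_map] at h
  simpa using h

-- the grouping fold of both ports: keys in order of first occurrence of the category
theorem pv_keys_modify_fold (l : List (String × List (String × String)))
    (d : PySem.Dict String (List String)) :
    (l.foldl (fun d p => d.modify (pvCat p.2) [] (fun x => x ++ [p.1])) d).keys
      = PySem.Set.update d.keys (l.map (fun p => pvCat p.2)) :=
  PySem.Dict.keys_foldl_modify_key l (fun p => pvCat p.2) []
    (fun _ p => fun x => x ++ [p.1]) d

-- B's first pass never changes any getD (default and inserted value are both [])
theorem pv_getD_setdefault_fold
    (l : List (String × List (String × String))) (d : PySem.Dict String (List String)) (c : String) :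
    (l.foldl (fun d p => d.setdefault (pvCat p.2) []) d).getD c [] = d.getD c [] := by
  induction l generalizing d with
  | nil => rfl
  | cons p l ih =>
    rw [List.foldl_cons, ih]
    by_cases hc : c = pvCat p.2
    · subst hc; exact PySem.Dict.getD_setdefault_self d _ [] []
    · rw [PySem.Dict.getD_eq_get?_getD, PySem.Dict.get?_setdefault_of_ne d [] hc,
        PySem.Dict.getD_eq_get?_getD]

-- B's first pass produces exactly the keys Set.update collects
theorem pv_keys_setdefault_fold
    (l : List (String × List (String × String))) (d : PySem.Dict String (List String)) :
    (l.foldl (fun d p => d.setdefault (pvCat p.2) []) d).keys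
      = PySem.Set.update d.keys (l.map (fun p => pvCat p.2)) := by
  induction l generalizing d with
  | nil => rfl
  | cons p l ih =>
    rw [List.foldl_cons, ih, List.map_cons]
    show _ = PySem.Set.update (PySem.Set.add d.keys (pvCat p.2)) _
    congr 1
    rw [PySem.Dict.keys_setdefault]
    by_cases h : d.contains (pvCat p.2) = true
    · have hm : pvCat p.2 ∈ d.keys := (PySem.Dict.contains_iff_mem_keys d _).mp h
      simp [PySem.Set.add, h, hm]
    · have hm : pvCat p.2 ∉ d.keys := fun hm =>
        h ((PySem.Dict.contains_iff_mem_keys d _).mpr hm)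
      simp [PySem.Set.add, h, hm]

-- A's second loop sorts the value at every key of the (nodup) key list, in place
theorem pv_getD_sort_fold
    (ks : List String) (hnd : ks.Nodup) (d : PySem.Dict String (List String)) (c : String) :
    (ks.foldl (fun d c => d.modify c [] (fun l => PySem.List.sorted l (fun x => x) false)) d).getD c []
      = if c ∈ ks then PySem.List.sorted (d.getD c []) (fun x => x) false else d.getD c [] := by
  induction ks generalizing d with
  | nil => simp
  | cons k ks ih =>
    rw [List.foldl_cons, ih (List.Nodup.of_cons hnd)]
    by_cases hc : c = k
    · subst hc
      have : c ∉ ks := (List.nodup_cons.mp hnd).1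
      simp [this]
    · simp [hc, PySem.Dict.getD_modify]

-- A's second loop keeps the key list
theorem pv_keys_sort_fold (ks : List String) (d : PySem.Dict String (List String)) :
    (ks.foldl (fun d c => d.modify c [] (fun l => PySem.List.sorted l (fun x => x) false)) d).keys
      = PySem.Set.update d.keys ks := by
  have h := PySem.Dict.keys_foldl_modify_key ks (fun c => c) []
    (fun _ _ => fun l => PySem.List.sorted l (fun x => x) false) d
  simpa using h

-- per category: sorting A's names in input order = collecting the names in globally sorted order
theorem pv_values_eq (devices_json : List (String × List (String × String))) (c : String) :
    PySem.List.sorted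
        ((((devices_json.map (fun p => (pvCat p.2, p.1))).filter (fun q => q.1 == c)).map (fun q => q.2)))
        (fun x => x) false
      = (((PySem.List.sorted devices_json (fun p => p.1) false).map (fun p => (pvCat p.2, p.1))).filter
          (fun q => q.1 == c)).map (fun q => q.2) := by
  apply PySem.List.sorted_id_eq_of_perm_of_pairwise
  · exact (((PySem.List.sorted_perm devices_json (fun p => p.1) false).map _).filter _).map _
  · have h1 : (PySem.List.sorted devices_json (fun p => p.1) false).Pairwise
        (fun a b => a.1 ≤ b.1) := PySem.List.sorted_pairwise devices_json (fun p => p.1)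
    have h2 : ((PySem.List.sorted devices_json (fun p => p.1) false).map
        (fun p => (pvCat p.2, p.1))).Pairwise (fun a b => a.2 ≤ b.2) :=
      List.pairwise_map.mpr h1
    exact List.pairwise_map.mpr (h2.filter (fun q => q.1 == c))

-- ===== VERDICT (by name: the statement is the Claim_ definition above) =====
theorem device_names_by_category_py_spec : Claim_equal_device_names_by_category_py := by
  intro dj _
  show device_names_by_category_py dj = device_names_by_category_py_alt dj
  unfold device_names_by_category_py device_names_by_category_py_alt
  set DA : PySem.Dict String (List String) := dj.foldl
    (fun d p => d.modify (pvCat p.2) [] (fun x => x ++ [p.1])) PySem.Dict.empty with hDA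
  set D0 : PySem.Dict String (List String) := dj.foldl
    (fun d p => d.setdefault (pvCat p.2) []) PySem.Dict.empty with hD0
  set DB : PySem.Dict String (List String) := (PySem.List.sorted dj (fun p => p.1) false).foldl
    (fun d p => d.modify (pvCat p.2) [] (fun x => x ++ [p.1])) D0 with hDB
  have hkA : DA.keys = PySem.Set.update [] (dj.map (fun p => pvCat p.2)) := by
    rw [hDA, pv_keys_modify_fold, PySem.Dict.keys_empty]
  have hndA : DA.keys.Nodup := by
    rw [hkA]; exact PySem.Set.nodup_update [] _ List.nodup_nil
  have hkB : DB.keys = DA.keys := by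
    rw [hDB, pv_keys_modify_fold, pv_keys_setdefault_fold, PySem.Dict.keys_empty, hkA]
    apply pv_update_subset_eq
    intro x hx
    rw [PySem.Set.mem_update]
    right
    rcases List.mem_map.mp hx with ⟨p, hp, hpx⟩
    exact List.mem_map.mpr ⟨p, (PySem.List.mem_sorted dj (fun p => p.1) false p).mp hp, hpx⟩
  have hndB : DB.keys.Nodup := hkB ▸ hndA
  set SA : PySem.Dict String (List String) := DA.keys.foldl
    (fun d c => d.modify c [] (fun l => PySem.List.sorted l (fun x => x) false)) DA with hSA
  have hkSA : SA.keys = DA.keys := by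
    rw [hSA, pv_keys_sort_fold]
    exact pv_update_subset_eq DA.keys DA.keys (fun x hx => hx)
  have hndSA : SA.keys.Nodup := hkSA ▸ hndA
  rw [PySem.Dict.items_eq_map_keys SA hndSA [], PySem.Dict.items_eq_map_keys DB hndB [],
    hkSA, hkB]
  apply List.map_congr_left
  intro c hc
  have hvA : DA.getD c []
      = ((dj.map (fun p => (pvCat p.2, p.1))).filter (fun q => q.1 == c)).map (fun q => q.2) := by
    rw [hDA, pv_getD_modify_fold, PySem.Dict.getD_empty, List.nil_append]
  have hvB : DB.getD c []
      = (((PySem.List.sorted dj (fun p => p.1) false).map (fun p => (pvCat p.2, p.1))).filter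
          (fun q => q.1 == c)).map (fun q => q.2) := by
    rw [hDB, pv_getD_modify_fold, hD0, pv_getD_setdefault_fold, PySem.Dict.getD_empty,
      List.nil_append]
  rw [hSA, pv_getD_sort_fold DA.keys hndA DA c, if_pos hc, hvA, hvB, pv_values_eq]
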